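-- pv_equiv track=rewrite | github.com/Janoxigen/Eye-Scanner | theBackrooms/ValBasedCX.py | __conflict_check_EC
-- ===== SOURCE A (Python) =====
-- def __conflict_check_EC(TupleList: list) -> bool:
--     """
--     Looks at all the Tuples of an EC and checks if they contradict each other due to overlaps.
--     (Only a Primitive check that checks for double-assignment of Primary/Secondary Letters)
--     False: no Conflict.
--     True: CONFLICT.
--     """
--     for Tuple_A in TupleList:
--         for Tuple_B in TupleList:
--             if Tuple_A != Tuple_B:              # for every pair of distinct Tuples
--                 if Tuple_A[0] == Tuple_B[0]:        # if both FirstLetters are the same: Conflict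
--                     return True
--                 if Tuple_A[1] == Tuple_B[1]:        # if both SecondLetters are the same: Conflict
--                     return True
--     return False
-- ===== SOURCE B (Python) =====
-- def __conflict_check_EC(TupleList: list) -> bool:
--     """Hash-based: conflict iff among the distinct tuples some first or second
--     component occurs more than once (O(n) instead of A's O(n^2))."""
--     distinct = set(TupleList)
--     return (len({t[0] for t in distinct}) < len(distinct)
--             or len({t[1] for t in distinct}) < len(distinct))
-- ===== Notes on version B (the rewrite author's own statement) =====
-- stated objective: faster
-- what changed: Replaced the nested all-pairs scan by hashing: dedupe the tuples once and compare the number of distinct first (resp. second) components with the number of distinct tuples.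
import Mathlib
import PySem

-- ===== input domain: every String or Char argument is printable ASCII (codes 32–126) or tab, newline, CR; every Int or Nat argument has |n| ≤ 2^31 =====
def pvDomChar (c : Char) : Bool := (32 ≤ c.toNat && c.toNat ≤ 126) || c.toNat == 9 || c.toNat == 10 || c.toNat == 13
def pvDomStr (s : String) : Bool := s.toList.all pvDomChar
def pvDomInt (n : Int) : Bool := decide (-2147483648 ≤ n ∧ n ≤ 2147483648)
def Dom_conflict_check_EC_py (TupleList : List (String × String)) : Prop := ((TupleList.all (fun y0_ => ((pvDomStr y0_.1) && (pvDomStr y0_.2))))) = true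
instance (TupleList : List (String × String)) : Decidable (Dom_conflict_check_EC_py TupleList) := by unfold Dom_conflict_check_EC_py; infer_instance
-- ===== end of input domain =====

-- B replaces A's O(n^2) all-pairs scan by a hash-style dedup-and-count (objective: faster).

-- ===== PORT A =====
-- A: nested loops over all pairs with early return True on a shared first or second component.
def conflict_check_EC_py (TupleList : List (String × String)) : Bool :=
  TupleList.any (fun Tuple_A =>
    TupleList.any (fun Tuple_B =>
      Tuple_A != Tuple_B && (Tuple_A.1 == Tuple_B.1 || Tuple_A.2 == Tuple_B.2)))

-- ===== PORT B =====
-- B: dedupe the tuples, then compare the count of distinct first (resp. second) components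
-- with the count of distinct tuples.
def conflict_check_EC_py_alt (TupleList : List (String × String)) : Bool :=
  let distinct : PySem.Set (String × String) := PySem.Set.ofList TupleList
  decide ((PySem.Set.ofList (distinct.map Prod.fst)).length < distinct.length) ||
  decide ((PySem.Set.ofList (distinct.map Prod.snd)).length < distinct.length)

-- ===== PRECONDITION & SPEC =====
def Spec_conflict_check_EC_py (TupleList : List (String × String)) (out : Bool) : Prop := out = conflict_check_EC_py_alt TupleList
instance (TupleList : List (String × String)) (out : Bool) : Decidable (Spec_conflict_check_EC_py TupleList out) := by unfold Spec_conflict_check_EC_py; infer_instance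

-- ===== CLAIM (what is proved, stated in full; the proofs are below) =====
def Claim_equal_conflict_check_EC_py : Prop := ∀ (TupleList : List (String × String)), Dom_conflict_check_EC_py TupleList → Spec_conflict_check_EC_py TupleList (conflict_check_EC_py TupleList)

-- ===== LEMMAS AND PROOFS =====

theorem toFinset_ofList {α : Type} [DecidableEq α] [BEq α] [LawfulBEq α] (ys : List α) :
    (PySem.Set.ofList ys).toFinset = ys.toFinset := by
  ext a
  simp [List.mem_toFinset, PySem.Set.mem_ofList]

theorem len_ofList_lt_iff {α : Type} [DecidableEq α] [BEq α] [LawfulBEq α] (ys : List α) :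
    (PySem.Set.ofList ys).length < ys.length ↔ ¬ ys.Nodup := by
  have h1 : (PySem.Set.ofList ys).length = ys.toFinset.card := by
    rw [← toFinset_ofList ys]
    exact (List.toFinset_card_of_nodup (PySem.Set.nodup_ofList ys)).symm
  constructor
  · intro hlt hnod
    rw [h1, List.toFinset_card_of_nodup hnod] at hlt
    exact lt_irrefl _ hlt
  · intro hnod
    rw [h1, List.card_toFinset]
    have hsub := List.dedup_sublist ys
    rcases lt_or_eq_of_le hsub.length_le with hlt | heq
    · exact hlt
    · exact absurd (List.dedup_eq_self.mp (hsub.eq_of_length heq)) hnod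

theorem dup_iff (xs : List (String × String)) (f : String × String → String) :
    ((PySem.Set.ofList ((PySem.Set.ofList xs).map f)).length < (PySem.Set.ofList xs).length ↔
      ∃ a ∈ xs, ∃ b ∈ xs, a ≠ b ∧ f a = f b) := by
  rw [show (PySem.Set.ofList xs).length = ((PySem.Set.ofList xs).map f).length from
        (List.length_map f).symm,
      len_ofList_lt_iff,
      List.nodup_map_iff_inj_on (PySem.Set.nodup_ofList xs)]
  push Not
  simp only [PySem.Set.mem_ofList]
  constructor <;> rintro ⟨a, ha, b, hb, h1, h2⟩ <;> exact ⟨a, ha, b, hb, h2, h1⟩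

theorem A_iff (xs : List (String × String)) :
    conflict_check_EC_py xs = true ↔
      ∃ a ∈ xs, ∃ b ∈ xs, a ≠ b ∧ (a.1 = b.1 ∨ a.2 = b.2) := by
  simp [conflict_check_EC_py, List.any_eq_true, bne_iff_ne]

-- ===== VERDICT (by name: the statement is the Claim_ definition above) =====
theorem conflict_check_EC_py_spec : Claim_equal_conflict_check_EC_py := by
  intro xs _
  unfold Spec_conflict_check_EC_py conflict_check_EC_py_alt
  rw [Bool.eq_iff_iff]
  simp only [Bool.or_eq_true, decide_eq_true_eq]
  rw [A_iff, dup_iff xs Prod.fst, dup_iff xs Prod.snd]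
  constructor
  · rintro ⟨a, ha, b, hb, hne, h | h⟩
    · exact Or.inl ⟨a, ha, b, hb, hne, h⟩
    · exact Or.inr ⟨a, ha, b, hb, hne, h⟩
  · rintro (⟨a, ha, b, hb, hne, h⟩ | ⟨a, ha, b, hb, hne, h⟩)
    exacts [⟨a, ha, b, hb, hne, Or.inl h⟩, ⟨a, ha, b, hb, hne, Or.inr h⟩]
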